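-- pv_equiv track=rewrite | github.com/TheKetan2/Programming-Practice | edabitPython/uncensor.py | uncensor
-- ===== SOURCE A (Python) =====
-- def uncensor(txt, vowels):
-- 	index = 0
-- 	string  = ""
-- 	for ch in txt:
-- 		if ch == "*":
-- 			string += vowels[index]
-- 			index +=1
-- 		else:
-- 			string += ch
-- 	return string
-- ===== SOURCE B (Python) =====
-- def uncensor(txt, vowels):
--     parts = txt.split('*')
--     return ''.join(seg + v for seg, v in zip(parts[:-1], vowels)) + parts[-1]
-- ===== Notes on version B (the rewrite author's own statement) =====
-- stated objective: faster
-- what changed: replaces the per-character scan that branches on each char and grows the result with repeated string += while tracking a vowel index, by split('*') followed by one join over the segments zip-interleaved with the vowels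
import Mathlib
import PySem

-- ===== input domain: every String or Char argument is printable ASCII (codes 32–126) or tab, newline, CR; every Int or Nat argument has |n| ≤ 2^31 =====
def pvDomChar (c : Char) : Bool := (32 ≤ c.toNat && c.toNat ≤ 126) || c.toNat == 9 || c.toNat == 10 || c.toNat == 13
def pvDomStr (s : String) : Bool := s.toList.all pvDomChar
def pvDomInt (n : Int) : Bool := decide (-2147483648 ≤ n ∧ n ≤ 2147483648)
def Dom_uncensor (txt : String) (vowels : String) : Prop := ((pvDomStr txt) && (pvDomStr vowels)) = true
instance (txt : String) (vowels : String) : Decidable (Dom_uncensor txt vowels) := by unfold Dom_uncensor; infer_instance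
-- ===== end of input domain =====

-- B replaces A's per-character scan (vowel index + string accumulator) by split('*') then
-- zip-interleaving the segments with the vowels; equal output on all inputs where A returns.

-- ===== PORT A =====
-- A: index = 0; string = ""; for ch in txt: if ch == '*': string += vowels[index]; index += 1
--    else: string += ch; return string.  vowels[index] out of range (IndexError) is the `none`
--    state threaded through the fold; Pre_uncensor excludes it (the "" result is unreachable there).
def uncensor (txt : String) (vowels : String) : String :=
  match txt.toList.foldl
      (fun st ch =>
        match st with
        | none => none
        | some (index, string) =>
          if ch = '*' then
            match PySem.List.pyGet? vowels.toList index with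
            | some v => some (index + 1, string ++ [v])
            | none => none
          else some (index, string ++ [ch]))
      (some ((0 : Int), ([] : List Char))) with
  | some (_, string) => String.ofList string
  | none => ""

-- ===== PORT B =====
-- B: parts = txt.split('*'); return ''.join(seg + v for seg, v in zip(parts[:-1], vowels)) + parts[-1]
-- parts is never empty (str.split returns at least one piece), so parts[-1] never raises in
-- Python; the `.getD []` default of pyGet? is unreachable.
def uncensor_alt (txt : String) (vowels : String) : String :=
  let parts := PySem.Chars.splitOn txt.toList ['*']
  let woven := ((PySem.List.slice parts none (some (-1))).zip vowels.toList).map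
      (fun p => p.1 ++ [p.2])
  String.ofList (woven.flatten ++ (PySem.List.pyGet? parts (-1)).getD [])

-- ===== PRECONDITION & SPEC =====
-- Pre_ excludes exactly the inputs on which A raises IndexError: more '*' in txt than chars in vowels.
def Pre_uncensor (txt : String) (vowels : String) : Prop :=
  txt.toList.count '*' ≤ vowels.toList.length

instance (txt : String) (vowels : String) : Decidable (Pre_uncensor txt vowels) := by
  unfold Pre_uncensor; infer_instance

def pvWitness_uncensor : String × String := ("wh*r* d*d my v*w*ls g*?", "eeioeo")

def Spec_uncensor (txt : String) (vowels : String) (out : String) : Prop := out = uncensor_alt txt vowels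
instance (txt : String) (vowels : String) (out : String) : Decidable (Spec_uncensor txt vowels out) := by unfold Spec_uncensor; infer_instance

-- ===== CLAIM (what is proved, stated in full; the proofs are below) =====
def Claim_equal_uncensor : Prop := ∀ (txt : String) (vowels : String), Dom_uncensor txt vowels → Pre_uncensor txt vowels → Spec_uncensor txt vowels (uncensor txt vowels)

-- ===== LEMMAS AND PROOFS =====

-- the common form of both programs: consume vowels left to right, one per '*'
def scanV : List Char → List Char → List Char
  | [], _ => []
  | c :: t, vs => if c = '*' then vs.headD c :: scanV t vs.tail else c :: scanV t vs

-- structural characterisation of splitOn with the single-char separator '*'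
def mySplit : List Char → List (List Char)
  | [] => [[]]
  | c :: t => if c = '*' then [] :: mySplit t else (mySplit t).modifyHead (c :: ·)

-- B's interleaving in recursive form
def weave : List (List Char) → List Char → List Char
  | [], _ => []
  | [p], _ => p
  | p :: _ :: _, [] => p
  | p :: q :: ps, v :: vs => p ++ v :: weave (q :: ps) vs

lemma mySplit_ne_nil (l : List Char) : mySplit l ≠ [] := by
  induction l with
  | nil => simp [mySplit]
  | cons c t ih =>
    simp only [mySplit]
    split
    · simp
    · cases h : mySplit t <;> simp_all

lemma splitOn_go_eq (l cur : List Char) (acc : List (List Char)) (fuel : Nat)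
    (h : l.length + 1 ≤ fuel) :
    PySem.Chars.splitOn.go ['*'] fuel l cur acc
      = acc.reverse ++ (mySplit l).modifyHead (cur.reverse ++ ·) := by
  induction l generalizing fuel cur acc with
  | nil =>
    obtain ⟨f, rfl⟩ : ∃ f, fuel = f + 1 := ⟨fuel - 1, by omega⟩
    simp [PySem.Chars.splitOn.go, mySplit]
  | cons c t ih =>
    obtain ⟨f, rfl⟩ : ∃ f, fuel = f + 1 := ⟨fuel - 1, by omega⟩
    rw [PySem.Chars.splitOn.go]
    by_cases hc : c = '*'
    · subst hc
      simp only [List.isPrefixOf, mySplit, if_pos]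
      rw [if_pos (by simp)]
      have hf : t.length + 1 ≤ f := by simp at h; omega
      simp only [List.length_cons, List.drop_succ_cons, List.length_nil, List.drop_zero]
      rw [ih _ _ f hf]
      obtain ⟨p, rest, hp⟩ : ∃ p rest, mySplit t = p :: rest := by
        cases hm : mySplit t with
        | nil => exact absurd hm (mySplit_ne_nil t)
        | cons p rest => exact ⟨p, rest, rfl⟩
      simp [hp]
    · rw [if_neg (by simp [Ne.symm hc])]
      have hf : t.length + 1 ≤ f := by simp at h; omega
      rw [ih _ _ f hf]
      simp only [mySplit, if_neg hc]
      obtain ⟨p, rest, hp⟩ : ∃ p rest, mySplit t = p :: rest := by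
        cases hm : mySplit t with
        | nil => exact absurd hm (mySplit_ne_nil t)
        | cons p rest => exact ⟨p, rest, rfl⟩
      simp [hp]

lemma splitOn_eq_mySplit (l : List Char) :
    PySem.Chars.splitOn l ['*'] = mySplit l := by
  rw [PySem.Chars.splitOn, splitOn_go_eq _ _ _ _ (by omega)]
  cases hm : mySplit l with
  | nil => exact absurd hm (mySplit_ne_nil l)
  | cons p rest => simp

lemma length_mySplit (l : List Char) : (mySplit l).length = l.count '*' + 1 := by
  induction l with
  | nil => simp [mySplit]
  | cons c t ih =>
    by_cases hc : c = '*'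
    · subst hc; simp [mySplit, ih]
    · simp [mySplit, hc, ih]

lemma weave_prepend (c : Char) (p : List Char) (ps : List (List Char)) (vs : List Char) :
    weave ((c :: p) :: ps) vs = c :: weave (p :: ps) vs := by
  rcases ps with _ | ⟨q, qs⟩
  · simp [weave]
  · rcases vs with _ | ⟨v, vt⟩ <;> simp [weave]

lemma weave_mySplit (l vs : List Char) (h : l.count '*' ≤ vs.length) :
    weave (mySplit l) vs = scanV l vs := by
  induction l generalizing vs with
  | nil => simp [mySplit, weave, scanV]
  | cons c t ih =>
    by_cases hc : c = '*'
    · subst hc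
      rcases vs with _ | ⟨v, vt⟩
      · simp at h
      · obtain ⟨p, rest, hp⟩ : ∃ p rest, mySplit t = p :: rest := by
          cases hm : mySplit t with
          | nil => exact absurd hm (mySplit_ne_nil t)
          | cons p rest => exact ⟨p, rest, rfl⟩
        simp only [mySplit, scanV, List.headD_cons, List.tail_cons, hp, reduceIte]
        simp only [weave, List.nil_append]
        rw [← hp, ih vt (by simp at h; omega)]
    · simp only [mySplit, scanV, if_neg hc]
      obtain ⟨p, rest, hp⟩ : ∃ p rest, mySplit t = p :: rest := by
        cases hm : mySplit t with
        | nil => exact absurd hm (mySplit_ne_nil t)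
        | cons p rest => exact ⟨p, rest, rfl⟩
      rw [hp, List.modifyHead_cons, weave_prepend, ← hp,
        ih vs (by simp [hc] at h; omega)]

lemma pyGet_neg_one_getLast (xs : List (List Char)) :
    PySem.List.pyGet? xs (-1) = xs.getLast? := by
  rcases xs with _ | ⟨a, t⟩
  · simp [PySem.List.pyGet?, PySem.List.pyIdx?]
  · simp [PySem.List.pyGet?, PySem.List.pyIdx?, List.getLast?_eq_getElem?]

lemma weave_eq (parts : List (List Char)) (vs : List Char) (hne : parts ≠ [])
    (hlen : parts.length ≤ vs.length + 1) :
    ((parts.dropLast.zip vs).map (fun p => p.1 ++ [p.2])).flatten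
        ++ ((PySem.List.pyGet? parts (-1)).getD [])
      = weave parts vs := by
  induction parts generalizing vs with
  | nil => exact absurd rfl hne
  | cons p ps ih =>
    rcases ps with _ | ⟨q, qs⟩
    · rcases vs with _ | ⟨v, vt⟩ <;> simp [weave, pyGet_neg_one_getLast]
    · rcases vs with _ | ⟨v, vt⟩
      · simp at hlen
      · rw [pyGet_neg_one_getLast, List.getLast?_cons_cons, ← pyGet_neg_one_getLast]
        simp only [List.dropLast_cons_of_ne_nil (by simp : (q :: qs : List (List Char)) ≠ []),
          List.zip_cons_cons, List.map_cons, List.flatten_cons, weave]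
        have := ih vt (by simp) (by simp at hlen ⊢; omega)
        simp [this]

lemma alt_eq_scanV (txt vowels : String)
    (h : txt.toList.count '*' ≤ vowels.toList.length) :
    uncensor_alt txt vowels = String.ofList (scanV txt.toList vowels.toList) := by
  simp only [uncensor_alt]
  rw [splitOn_eq_mySplit, PySem.List.slice_to_neg_one,
    weave_eq _ _ (mySplit_ne_nil _) (by rw [length_mySplit]; omega),
    weave_mySplit _ _ h]

lemma a_loop_eq_scanV (vlist : List Char) (txt : List Char) (i : Nat) (acc : List Char)
    (h : txt.count '*' + i ≤ vlist.length) :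
    txt.foldl
      (fun st ch =>
        match st with
        | none => none
        | some (index, string) =>
          if ch = '*' then
            match PySem.List.pyGet? vlist index with
            | some v => some (index + 1, string ++ [v])
            | none => none
          else some (index, string ++ [ch]))
      (some ((i : Int), acc))
      = some (((i + txt.count '*' : Nat) : Int), acc ++ scanV txt (vlist.drop i)) := by
  induction txt generalizing i acc with
  | nil => simp [scanV]
  | cons c t ih =>
    by_cases hc : c = '*'
    · subst hc
      have hi : i < vlist.length := by simp at h; omega
      have hget : PySem.List.pyGet? vlist (i : Int) = some vlist[i] := by
        simp [PySem.List.pyGet?, PySem.List.pyIdx?, hi]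
      simp only [List.foldl_cons, hget, reduceIte]
      have hcast : ((i : Int) + 1) = ((i + 1 : Nat) : Int) := by push_cast; ring
      rw [hcast, ih (i + 1) (acc ++ [vlist[i]]) (by simp at h; omega)]
      have hd1 : (vlist.drop i).tail = vlist.drop (i + 1) := by rw [List.tail_drop]
      have hdv : (vlist.drop i).headD '*' = vlist[i] := by
        rw [List.headD_eq_head?_getD, List.head?_drop]
        simp [hi]
      simp only [scanV, reduceIte, hdv, hd1, List.count_cons]
      refine congrArg some (Prod.ext ?_ ?_)
      · simp; omega
      · simp
    · simp only [List.foldl_cons, if_neg hc]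
      rw [ih i (acc ++ [c]) (by simp [hc] at h; omega)]
      simp [scanV, hc]

-- ===== VERDICT (by name: the statement is the Claim_ definition above) =====
theorem uncensor_spec : Claim_equal_uncensor := by
  intro txt vowels _ hpre
  unfold Spec_uncensor uncensor
  have h0 := a_loop_eq_scanV vowels.toList txt.toList 0 [] (by simpa using hpre)
  simp only [Nat.cast_zero, List.drop_zero, List.nil_append, Nat.zero_add] at h0
  rw [h0, alt_eq_scanV txt vowels hpre]
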